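-- pv_equiv track=rewrite | github.com/b1456089826/easytransfer | src/easytransfer/sender_pipeline.py | _select_repair_indices
-- ===== SOURCE A (Python) =====
-- import math
--
-- def _select_repair_indices(k: int, repair_idx: int) -> list[int]:
--     if k <= 0:
--         return []
--     width = min(max(2, int(math.sqrt(k)) + 1), k)
--     start = (repair_idx * width) % k
--     out: list[int] = []
--     for i in range(width):
--         out.append((start + i) % k)
--     out = sorted(set(out))
--     if not out:
--         out = [repair_idx % k]
--     return out
-- ===== SOURCE B (Python) =====
-- import math
--
-- def _select_repair_indices(k: int, repair_idx: int) -> list[int]: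
--     if k <= 0:
--         return []
--     width = min(max(2, int(math.sqrt(k)) + 1), k)
--     start = (repair_idx * width) % k
--     end = start + width
--     if end <= k:
--         return list(range(start, end))
--     return list(range(0, end - k)) + list(range(start, k))
-- ===== Notes on version B (the rewrite author's own statement) =====
-- stated objective: simpler
-- what changed: B replaces A's loop-then-set-then-sort with a closed-form wrap analysis: the result is width consecutive indices mod k, so B emits range(start, end) directly, or the two sorted non-overlapping segments range(0, end-k) + range(start, k) when the run wraps; no set, no sort, no per-element modulo.
import Mathlib
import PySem

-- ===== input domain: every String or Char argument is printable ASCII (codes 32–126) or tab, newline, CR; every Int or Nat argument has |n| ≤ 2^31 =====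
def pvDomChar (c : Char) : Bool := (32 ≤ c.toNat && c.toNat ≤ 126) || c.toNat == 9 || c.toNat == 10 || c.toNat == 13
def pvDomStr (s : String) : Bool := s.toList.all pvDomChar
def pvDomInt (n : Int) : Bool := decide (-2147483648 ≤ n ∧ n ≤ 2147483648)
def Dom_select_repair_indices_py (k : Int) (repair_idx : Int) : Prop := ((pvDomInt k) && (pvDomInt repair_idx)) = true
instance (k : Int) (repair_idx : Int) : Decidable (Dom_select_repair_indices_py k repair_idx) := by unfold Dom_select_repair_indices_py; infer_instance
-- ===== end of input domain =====

-- B computes A's answer (width consecutive indices mod k, sorted) by closed-form wrap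
-- analysis — the run's one or two sorted segments — instead of loop + set + sort (objective: simpler).


-- ===== PORT A =====
-- int(math.sqrt(k)) is ported as Nat.sqrt k.toNat: exact on the domain (0 < k ≤ 2^31;
-- float-sqrt truncation first disagrees with the integer sqrt near 4.5e15).
def select_repair_indices_py (k : Int) (repair_idx : Int) : List Int :=
  if k ≤ 0 then []
  else
    let width := min (max 2 ((k.toNat.sqrt : Int) + 1)) k
    let start := PySem.Int.mod (repair_idx * width) k
    let out : List Int :=
      (PySem.List.pyRange 0 width 1).foldl (fun acc i => acc ++ [PySem.Int.mod (start + i) k]) []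
    let out := PySem.List.sorted (PySem.Set.ofList out) (fun x => x) false
    if out = [] then [PySem.Int.mod repair_idx k] else out

-- ===== PORT B =====
def select_repair_indices_py_alt (k : Int) (repair_idx : Int) : List Int :=
  if k ≤ 0 then []
  else
    let width := min (max 2 ((k.toNat.sqrt : Int) + 1)) k
    let start := PySem.Int.mod (repair_idx * width) k
    let e := start + width
    if e ≤ k then PySem.List.pyRange start e 1
    else PySem.List.pyRange 0 (e - k) 1 ++ PySem.List.pyRange start k 1

-- ===== PRECONDITION & SPEC =====
def Spec_select_repair_indices_py (k : Int) (repair_idx : Int) (out : List Int) : Prop := out = select_repair_indices_py_alt k repair_idx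
instance (k : Int) (repair_idx : Int) (out : List Int) : Decidable (Spec_select_repair_indices_py k repair_idx out) := by unfold Spec_select_repair_indices_py; infer_instance

-- ===== CLAIM (what is proved, stated in full; the proofs are below) =====
def Claim_equal_select_repair_indices_py : Prop := ∀ (k : Int) (repair_idx : Int), Dom_select_repair_indices_py k repair_idx → Spec_select_repair_indices_py k repair_idx (select_repair_indices_py k repair_idx)

-- ===== LEMMAS AND PROOFS =====

-- one loop step of A: (start + i) % k for 0 <= start+i < 2k is start+i, minus k on wrap
lemma mod_small_wrap (x k : Int) (hk : 0 < k) (hx : 0 ≤ x) (hx2 : x < 2 * k) :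
    PySem.Int.mod x k = if x < k then x else x - k := by
  rw [PySem.Int.mod_eq_emod_of_pos hk]
  split_ifs with h
  · exact Int.emod_eq_of_lt hx h
  · rw [← Int.sub_emod_right x k]
    exact Int.emod_eq_of_lt (by omega) (by omega)

-- the raw loop output of A: the unwrapped run, or its two wrapped pieces high-then-low
lemma rawA_eq (s k w : Int) (hk : 0 < k) (hs0 : 0 ≤ s) (hsk : s < k) (hw1 : 1 ≤ w) (hwk : w ≤ k) :
    (PySem.List.pyRange 0 w 1).foldl (fun acc i => acc ++ [PySem.Int.mod (s + i) k]) []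
      = if s + w ≤ k then PySem.List.pyRange s (s + w) 1
        else PySem.List.pyRange s k 1 ++ PySem.List.pyRange 0 (s + w - k) 1 := by
  rw [PySem.List.foldl_append_singleton_eq_map, List.nil_append,
      PySem.List.pyRange_one 0 w, List.map_map]
  split_ifs with h
  · rw [PySem.List.pyRange_one s (s + w), show (s + w - s).toNat = (w - 0).toNat by omega]
    refine List.map_congr_left (fun j hj => ?_)
    have hj' : (j : Int) < w := by have := List.mem_range.mp hj; omega
    simp only [Function.comp]
    rw [show s + (0 + (j : Int)) = s + (j : Int) by ring,
        mod_small_wrap (s + j) k hk (by omega) (by omega)]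
    have hlt : s + (j : Int) < k := by omega
    simp [hlt]
  · rw [show (w - 0).toNat = (k - s).toNat + (s + w - k).toNat by omega,
        List.range_add, List.map_append, List.map_map,
        PySem.List.pyRange_one s k, PySem.List.pyRange_one 0 (s + w - k),
        show (s + w - k - 0).toNat = (s + w - k).toNat by omega]
    have h1 : List.map ((fun i => PySem.Int.mod (s + i) k) ∘ fun j : Nat => 0 + (j : Int))
        (List.range (k - s).toNat) = List.map (fun j : Nat => s + (j : Int)) (List.range (k - s).toNat) := by
      refine List.map_congr_left (fun j hj => ?_)
      have hj' : (j : Int) < k - s := by have := List.mem_range.mp hj; omega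
      simp only [Function.comp]
      rw [show s + (0 + (j : Int)) = s + (j : Int) by ring,
          mod_small_wrap (s + j) k hk (by omega) (by omega)]
      have hlt : s + (j : Int) < k := by omega
      simp [hlt]
    have h2 : List.map (((fun i => PySem.Int.mod (s + i) k) ∘ fun j : Nat => 0 + (j : Int)) ∘
          fun x : Nat => (k - s).toNat + x) (List.range (s + w - k).toNat)
        = List.map (fun j : Nat => 0 + (j : Int)) (List.range (s + w - k).toNat) := by
      refine List.map_congr_left (fun j hj => ?_)
      have hj' : (j : Int) < s + w - k := by have := List.mem_range.mp hj; omega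
      simp only [Function.comp]
      have hcast : ((((k - s).toNat + j : Nat)) : Int) = k - s + j := by push_cast; omega
      rw [show (0 : Int) + ((((k - s).toNat + j : Nat)) : Int) = (((k - s).toNat + j : Nat) : Int) by ring,
          hcast, mod_small_wrap (s + (k - s + j)) k hk (by omega) (by omega)]
      have hge : ¬ s + (k - s + (j : Int)) < k := by omega
      simp only [hge, if_false]
      ring
    exact congrArg₂ (· ++ ·) h1 h2

-- B's wrapped output is strictly increasing (low segment entirely below the high one)
lemma pairwise_lt_B (s k e : Int) (hse : e - k ≤ s) :
    (PySem.List.pyRange 0 (e - k) 1 ++ PySem.List.pyRange s k 1).Pairwise (· < ·) := by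
  rw [List.pairwise_append]
  refine ⟨PySem.List.pairwise_lt_pyRange_one 0 (e - k), PySem.List.pairwise_lt_pyRange_one s k, ?_⟩
  intro x hx y hy
  have h1 := PySem.List.mem_pyRange_one.mp hx
  have h2 := PySem.List.mem_pyRange_one.mp hy
  omega

-- ===== VERDICT (by name: the statement is the Claim_ definition above) =====
theorem select_repair_indices_py_spec : Claim_equal_select_repair_indices_py := by
  intro k repair_idx _
  unfold Spec_select_repair_indices_py select_repair_indices_py select_repair_indices_py_alt
  by_cases hk : k ≤ 0
  · simp [hk]
  · simp only [hk, if_false]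
    have hk' : 0 < k := by omega
    set w : Int := min (max 2 ((k.toNat.sqrt : Int) + 1)) k with hw
    set s : Int := PySem.Int.mod (repair_idx * w) k with hs
    have hw1 : 1 ≤ w := by
      have h2 : (2 : Int) ≤ max 2 ((k.toNat.sqrt : Int) + 1) := le_max_left _ _
      have := min_le_right (max 2 ((k.toNat.sqrt : Int) + 1)) k
      rw [hw]; omega
    have hwk : w ≤ k := min_le_right _ _
    have hs0 : 0 ≤ s := PySem.Int.mod_nonneg _ hk'
    have hsk : s < k := PySem.Int.mod_lt _ hk'
    rw [rawA_eq s k w hk' hs0 hsk hw1 hwk]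
    by_cases he : s + w ≤ k
    · simp only [he, if_true]
      rw [PySem.Set.ofList_eq_self_of_nodup _ (PySem.List.nodup_pyRange_one s (s + w)),
          PySem.List.sorted_eq_self_of_pairwise _ _
            ((PySem.List.pairwise_lt_pyRange_one s (s + w)).imp (fun h => le_of_lt h))]
      have hne : PySem.List.pyRange s (s + w) 1 ≠ [] := by
        intro hnil
        have := PySem.List.length_pyRange_one s (s + w)
        rw [hnil] at this
        simp at this
        omega
      simp [hne]
    · simp only [he, if_false]
      have hpw : (PySem.List.pyRange 0 (s + w - k) 1 ++ PySem.List.pyRange s k 1).Pairwise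
          (fun a b : Int => a < b) := pairwise_lt_B s k (s + w) (by omega)
      have hperm : (PySem.List.pyRange 0 (s + w - k) 1 ++ PySem.List.pyRange s k 1).Perm
          (PySem.List.pyRange s k 1 ++ PySem.List.pyRange 0 (s + w - k) 1) :=
        List.perm_append_comm
      have hndraw : (PySem.List.pyRange s k 1 ++ PySem.List.pyRange 0 (s + w - k) 1).Nodup :=
        hperm.nodup (hpw.imp (fun h => ne_of_lt h))
      rw [PySem.Set.ofList_eq_self_of_nodup _ hndraw,
          PySem.List.sorted_eq_of_perm_of_pairwise_lt _ _ _ hperm hpw]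
      have hne : PySem.List.pyRange 0 (s + w - k) 1 ++ PySem.List.pyRange s k 1 ≠ [] := by
        intro hnil
        have h2 := List.append_eq_nil_iff.mp hnil
        have := PySem.List.length_pyRange_one s k
        rw [h2.2] at this
        simp at this
        omega
      simp [hne]
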